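-- pv_equiv track=rewrite | github.com/daveisagit/advent-of-code | src/common/blocks.py | intersection_block
-- ===== SOURCE A (Python) =====
-- from itertools import pairwise
--
-- def combine_blocks(a: list, b: list) -> list:
--     """A block is a list of dimension pairs (Bx,B'x), (By,B'y), (Bz,B'z)
--     where B and B' are the opposite corners. Each pair is like a side of a block.
--     The return is a set of blocks which represent the resulting possible workspace
--     The client of this function can then determine the relevance of each
--     within its own context.
--     """
--     result = []
--     grid_markers = [sorted(set(list(sides[0]) + list(sides[1]))) for sides in zip(a, b)]
--     dimensions = len(grid_markers)
--
--     def iterate_dimension(other_sides: list):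
--         cur_depth = len(other_sides)
--         markers = grid_markers[cur_depth]
--         for side in pairwise(markers):
--             new_list_of_sides = other_sides + [side]
--             if cur_depth < dimensions - 1:
--                 iterate_dimension(new_list_of_sides)
--                 continue
--             result.append(tuple(new_list_of_sides))
--
--     iterate_dimension([])
--
--     return result
--
-- def intersection_block(a: list, b: list) -> list:
--     """Intersection: of the workspace which new sub blocks are in a and b
--     Should be 1 or 0 in theory?"""
--     result = []
--     for c in combine_blocks(a, b):
--         c_inside_a = all(
--             a_side[0] <= c_side[0] and c_side[1] <= a_side[1]
--             for a_side, c_side in zip(a, c)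
--         )
--         c_inside_b = all(
--             b_side[0] <= c_side[0] and c_side[1] <= b_side[1]
--             for b_side, c_side in zip(b, c)
--         )
--         if c_inside_a and c_inside_b:
--             result.append(c)
--     return result
-- ===== SOURCE B (Python) =====
-- def intersection_block(a: list, b: list) -> list:
--     """Per-dimension interval intersection: O(d) instead of enumerating cells."""
--     sides = []
--     for a_side, b_side in zip(a, b):
--         lo = max(a_side[0], b_side[0])
--         hi = min(a_side[1], b_side[1])
--         if lo >= hi:
--             return []
--         sides.append((lo, hi))
--     return [tuple(sides)]
-- ===== Notes on version B (the rewrite author's own statement) =====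
-- stated objective: faster
-- what changed: A builds the merged grid of all marker coordinates and enumerates every cell of the cartesian product of adjacent-marker pairs (up to 3^d cells), testing each for containment in both blocks; B computes the single candidate intersection directly with one max(lo)/min(hi) interval intersection per dimension.
-- crash fix: When either argument list is empty, A raises IndexError (grid_markers[0] on an empty list of dimensions) while B returns the empty block [()]. — e.g. on intersection_block([], [(0, 1)]): A raises IndexError, B returns [[]]
import Mathlib
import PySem

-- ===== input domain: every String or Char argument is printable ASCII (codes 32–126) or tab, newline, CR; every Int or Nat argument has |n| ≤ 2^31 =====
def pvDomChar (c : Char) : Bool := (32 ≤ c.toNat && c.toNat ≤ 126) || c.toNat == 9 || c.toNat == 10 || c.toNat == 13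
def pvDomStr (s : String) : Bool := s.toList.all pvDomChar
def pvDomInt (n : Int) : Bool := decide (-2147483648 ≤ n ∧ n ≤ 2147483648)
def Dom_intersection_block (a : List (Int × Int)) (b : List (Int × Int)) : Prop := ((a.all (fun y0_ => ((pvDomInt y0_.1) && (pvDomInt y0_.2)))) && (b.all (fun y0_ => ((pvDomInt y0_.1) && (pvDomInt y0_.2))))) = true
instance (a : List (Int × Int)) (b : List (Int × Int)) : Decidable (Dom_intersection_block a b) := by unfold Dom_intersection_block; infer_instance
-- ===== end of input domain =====

-- B replaces A's enumeration of all grid cells of the combined markers (exponential in the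
-- number of dimensions) by one per-dimension interval intersection max(lo)/min(hi): faster (asymptotic).

-- ===== PORT A =====
-- sorted(set(list(sides[0]) + list(sides[1]))) for one dimension
def pvMarkers (sa sb : Int × Int) : List Int :=
  PySem.List.sorted (PySem.Set.ofList [sa.1, sa.2, sb.1, sb.2]) (fun x => x) false

-- itertools.pairwise: exact (adjacent pairs, in order)
def pvPairwise (xs : List Int) : List (Int × Int) := xs.zip xs.tail

-- the nested function iterate_dimension, recursing over the remaining dimensions'
-- grid markers; each loop iteration either recurses or appends, in depth-first order
def pvIterDim : List (List Int) → List (Int × Int) → List (List (Int × Int))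
  | [], _ => []
  | m :: rest, other =>
    (pvPairwise m).flatMap (fun side =>
      if rest.isEmpty then [other ++ [side]] else pvIterDim rest (other ++ [side]))

def pvCombineBlocks (a b : List (Int × Int)) : List (List (Int × Int)) :=
  pvIterDim ((a.zip b).map (fun sp => pvMarkers sp.1 sp.2)) []

def intersection_block (a : List (Int × Int)) (b : List (Int × Int)) : List (List (Int × Int)) :=
  (pvCombineBlocks a b).filter (fun c =>
    ((a.zip c).all (fun q => decide (q.1.1 ≤ q.2.1) && decide (q.2.2 ≤ q.1.2))) &&
    ((b.zip c).all (fun q => decide (q.1.1 ≤ q.2.1) && decide (q.2.2 ≤ q.1.2))))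

-- ===== PORT B =====
def pvGo : List ((Int × Int) × (Int × Int)) → List (Int × Int) → List (List (Int × Int))
  | [], sides => [sides]
  | sp :: rest, sides =>
    let lo := max sp.1.1 sp.2.1
    let hi := min sp.1.2 sp.2.2
    if lo ≥ hi then [] else pvGo rest (sides ++ [(lo, hi)])

def intersection_block_alt (a : List (Int × Int)) (b : List (Int × Int)) : List (List (Int × Int)) :=
  pvGo (a.zip b) []

-- ===== PRECONDITION & SPEC =====
-- A raises IndexError (grid_markers[0] on an empty marker list) when either argument is empty;
-- Pre_ excludes exactly those inputs.
def Pre_intersection_block (a : List (Int × Int)) (b : List (Int × Int)) : Prop := a ≠ [] ∧ b ≠ []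
instance (a : List (Int × Int)) (b : List (Int × Int)) : Decidable (Pre_intersection_block a b) := by unfold Pre_intersection_block; infer_instance
def pvWitness_intersection_block : (List (Int × Int)) × (List (Int × Int)) := ([(0, 2)], [(1, 3)])

-- On inputs where either list is empty, A raises IndexError while B returns the empty block [[]].
def Raises_intersection_block (a : List (Int × Int)) (b : List (Int × Int)) : Prop := a = [] ∨ b = []
instance (a : List (Int × Int)) (b : List (Int × Int)) : Decidable (Raises_intersection_block a b) := by unfold Raises_intersection_block; infer_instance
def pvRaiseWitness_intersection_block : (List (Int × Int)) × (List (Int × Int)) := ([], [(0, 1)])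
def pvRaiseWitnessOut_intersection_block : List (List (Int × Int)) := [[]]

def Spec_intersection_block (a : List (Int × Int)) (b : List (Int × Int)) (out : List (List (Int × Int))) : Prop := out = intersection_block_alt a b
instance (a : List (Int × Int)) (b : List (Int × Int)) (out : List (List (Int × Int))) : Decidable (Spec_intersection_block a b out) := by unfold Spec_intersection_block; infer_instance

-- ===== CLAIM (what is proved, stated in full; the proofs are below) =====
def Claim_equal_intersection_block : Prop := ∀ (a : List (Int × Int)) (b : List (Int × Int)), Dom_intersection_block a b → Pre_intersection_block a b → Spec_intersection_block a b (intersection_block a b)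
def Claim_raises_intersection_block : Prop := (∀ (a : List (Int × Int)) (b : List (Int × Int)), Dom_intersection_block a b → Raises_intersection_block a b → ¬ Pre_intersection_block a b) ∧ (Dom_intersection_block (pvRaiseWitness_intersection_block.1) (pvRaiseWitness_intersection_block.2) ∧ Raises_intersection_block (pvRaiseWitness_intersection_block.1) (pvRaiseWitness_intersection_block.2) ∧ intersection_block_alt (pvRaiseWitness_intersection_block.1) (pvRaiseWitness_intersection_block.2) = pvRaiseWitnessOut_intersection_block)

-- ===== LEMMAS AND PROOFS =====

-- per-dimension membership predicate of A's filter (after splitting the two zips)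
def pvGood (sp : (Int × Int) × (Int × Int)) (s : Int × Int) : Bool :=
  (decide (sp.1.1 ≤ s.1) && decide (s.2 ≤ sp.1.2)) && (decide (sp.2.1 ≤ s.1) && decide (s.2 ≤ sp.2.2))

def pvInside (p : List ((Int × Int) × (Int × Int))) (c : List (Int × Int)) : Bool :=
  (p.zip c).all (fun x => pvGood x.1 x.2)

def pvOk (sp : (Int × Int) × (Int × Int)) : Bool :=
  decide (max sp.1.1 sp.2.1 < min sp.1.2 sp.2.2)

def pvLoHi (sp : (Int × Int) × (Int × Int)) : Int × Int :=
  (max sp.1.1 sp.2.1, min sp.1.2 sp.2.2)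

def pvCart : List (List Int) → List (List (Int × Int))
  | [] => [[]]
  | m :: rest => (pvPairwise m).flatMap (fun s => (pvCart rest).map (s :: ·))

lemma pvGo_eq (p : List ((Int × Int) × (Int × Int))) : ∀ sides,
    pvGo p sides = if p.all pvOk then [sides ++ p.map pvLoHi] else [] := by
  induction p with
  | nil => intro sides; simp [pvGo]
  | cons sp rest ih =>
    intro sides
    simp only [pvGo, List.all_cons, List.map_cons]
    by_cases h : max sp.1.1 sp.2.1 < min sp.1.2 sp.2.2
    · rw [if_neg (by omega : ¬ max sp.1.1 sp.2.1 ≥ min sp.1.2 sp.2.2), ih]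
      simp only [pvOk, pvLoHi, h, decide_true, Bool.true_and]
      split <;> simp [List.append_assoc]
    · rw [if_pos (by omega : max sp.1.1 sp.2.1 ≥ min sp.1.2 sp.2.2)]
      simp [pvOk, h]

lemma pvIterDim_eq_cart (gms : List (List Int)) (h : gms ≠ []) : ∀ acc,
    pvIterDim gms acc = (pvCart gms).map (acc ++ ·) := by
  induction gms with
  | nil => exact absurd rfl h
  | cons m rest ih =>
    intro acc
    cases rest with
    | nil =>
      simp only [pvIterDim, pvCart, List.isEmpty_nil, if_pos, List.map_flatMap]
      rfl
    | cons m' rest' =>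
      show (pvPairwise m).flatMap (fun side => pvIterDim (m' :: rest') (acc ++ [side])) = _
      rw [pvCart, List.map_flatMap]
      refine List.flatMap_congr (fun s _ => ?_)
      rw [ih (by simp), List.map_map]
      refine List.map_congr_left (fun c _ => ?_)
      simp

lemma pvZip_split {α β γ : Type} (fA : α × γ → Bool) (fB : β × γ → Bool) :
    ∀ (a : List α) (b : List β) (c : List γ), c.length = (a.zip b).length →
    (((a.zip c).all fA) && ((b.zip c).all fB)) =
      ((a.zip b).zip c).all (fun x => fA (x.1.1, x.2) && fB (x.1.2, x.2)) := by
  intro a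
  induction a with
  | nil => intro b c h; simp at h; simp [h]
  | cons x a' ih =>
    intro b c h
    cases b with
    | nil => simp at h; simp [h]
    | cons y b' =>
      cases c with
      | nil => simp
      | cons z c' =>
        simp only [List.zip_cons_cons, List.all_cons] at h ⊢
        have h' : c'.length = (a'.zip b').length := by simpa using h
        rw [← ih b' c' h']
        cases fA (x, z) <;> cases fB (y, z) <;> simp

lemma pvMem_cart_length : ∀ (gms : List (List Int)) (c : List (Int × Int)),
    c ∈ pvCart gms → c.length = gms.length := by
  intro gms
  induction gms with
  | nil => intro c hc; simp [pvCart] at hc; simp [hc]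
  | cons m rest ih =>
    intro c hc
    simp only [pvCart, List.mem_flatMap, List.mem_map] at hc
    obtain ⟨s, _, c', hc', rfl⟩ := hc
    simp [ih c' hc']

lemma pvMem_zip_tail {xs : List Int} {s : Int × Int} (h : s ∈ xs.zip xs.tail) :
    s.1 ∈ xs ∧ s.2 ∈ xs.tail := by
  have h1 := List.of_mem_zip h
  exact ⟨h1.1, h1.2⟩

lemma pvZip_tail_lt {xs : List Int} (hs : xs.Pairwise (· < ·)) :
    ∀ s ∈ xs.zip xs.tail, s.1 < s.2 := by
  induction xs with
  | nil => simp
  | cons x rest ih =>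
    intro s hs'
    cases rest with
    | nil => simp at hs'
    | cons y rest' =>
      simp only [List.tail_cons, List.zip_cons_cons, List.mem_cons] at hs'
      rcases hs' with rfl | hs'
      · exact (List.pairwise_cons.mp hs).1 y (by simp)
      · exact ih hs.of_cons s hs' 

lemma pvAdj_filter (lo hi : Int) : ∀ (xs : List Int), xs.Pairwise (· < ·) →
    lo ∈ xs → hi ∈ xs → lo < hi → (∀ m ∈ xs, m ≤ lo ∨ hi ≤ m) →
    (pvPairwise xs).filter (fun s => decide (lo ≤ s.1) && decide (s.2 ≤ hi)) = [(lo, hi)] := by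
  intro xs
  induction xs with
  | nil => intro _ hlo; simp at hlo
  | cons x rest ih =>
    intro hs hlo hhi hlt hsplit
    cases rest with
    | nil => simp at hlo hhi; omega
    | cons y rest' =>
      have hxy : x < y := (List.pairwise_cons.mp hs).1 y (by simp)
      have hrest : (y :: rest').Pairwise (· < ·) := hs.of_cons
      show ((x, y) :: (y :: rest').zip rest').filter _ = _
      by_cases hx : x = lo
      · subst hx
        have hy : hi = y := by
          have h2 : hi ≤ y := by
            rcases hsplit y (by simp) with h | h
            · omega
            · exact h
          rcases List.mem_cons.mp hhi with h | h
          · omega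
          rcases List.mem_cons.mp h with h | h
          · exact h
          · have := (List.pairwise_cons.mp hrest).1 hi h; omega
        subst hy
        rw [List.filter_cons_of_pos (by simp)]
        have htail : ((hi :: rest').zip rest').filter
            (fun s => decide (x ≤ s.1) && decide (s.2 ≤ hi)) = [] := by
          refine List.filter_eq_nil_iff.mpr (fun s hsmem => ?_)
          obtain ⟨h1, h2⟩ := pvMem_zip_tail (xs := hi :: rest') hsmem
          have hslt := pvZip_tail_lt hrest s hsmem
          have hy1 : hi ≤ s.1 := by
            rcases List.mem_cons.mp h1 with h | h
            · omega
            · exact le_of_lt ((List.pairwise_cons.mp hrest).1 s.1 h)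
          simp only [Bool.and_eq_true, decide_eq_true_eq, not_and]
          intro _ h2'; omega
        rw [htail]
      · have hxlo : x < lo := by
          rcases hsplit x (by simp) with h | h
          · omega
          · exfalso
            rcases List.mem_cons.mp hlo with h' | h'
            · omega
            · have := (List.pairwise_cons.mp hs).1 lo h'; omega
        have hlo' : lo ∈ y :: rest' := by
          rcases List.mem_cons.mp hlo with h | h
          · omega
          · exact h
        have hhi' : hi ∈ y :: rest' := by
          rcases List.mem_cons.mp hhi with h | h
          · omega
          · exact h
        rw [List.filter_cons_of_neg (by
          simp only [Bool.and_eq_true, decide_eq_true_eq, not_and]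
          intro h; omega)]
        exact ih hrest hlo' hhi' hlt (fun m hm => hsplit m (by simp [hm]))

lemma pvDim_filter (sp : (Int × Int) × (Int × Int)) :
    (pvPairwise (pvMarkers sp.1 sp.2)).filter (pvGood sp) =
      if pvOk sp then [pvLoHi sp] else [] := by
  have hsort : (pvMarkers sp.1 sp.2).Pairwise (· < ·) :=
    PySem.List.sorted_ofList_pairwise_lt _
  have hmem : ∀ z : Int, z ∈ pvMarkers sp.1 sp.2 ↔
      (z = sp.1.1 ∨ z = sp.1.2 ∨ z = sp.2.1 ∨ z = sp.2.2) := by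
    intro z
    simp [pvMarkers, PySem.List.mem_sorted, PySem.Set.mem_ofList]
  by_cases hok : max sp.1.1 sp.2.1 < min sp.1.2 sp.2.2
  · rw [if_pos (by simp [pvOk, hok])]
    have hpred : ∀ s : Int × Int, pvGood sp s =
        (decide (max sp.1.1 sp.2.1 ≤ s.1) && decide (s.2 ≤ min sp.1.2 sp.2.2)) := by
      intro s
      rw [Bool.eq_iff_iff]
      simp only [pvGood, Bool.and_eq_true, decide_eq_true_eq]
      omega
    rw [List.filter_congr (fun s _ => hpred s)]
    have hlo : max sp.1.1 sp.2.1 ∈ pvMarkers sp.1 sp.2 := by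
      rcases max_choice sp.1.1 sp.2.1 with h | h <;> rw [h] <;> simp [hmem]
    have hhi : min sp.1.2 sp.2.2 ∈ pvMarkers sp.1 sp.2 := by
      rcases min_choice sp.1.2 sp.2.2 with h | h <;> rw [h] <;> simp [hmem]
    have hsplit : ∀ m ∈ pvMarkers sp.1 sp.2,
        m ≤ max sp.1.1 sp.2.1 ∨ min sp.1.2 sp.2.2 ≤ m := by
      intro m hm
      rcases (hmem m).mp hm with h | h | h | h <;> omega
    rw [pvAdj_filter _ _ _ hsort hlo hhi hok hsplit]
    rfl
  · rw [if_neg (by simp [pvOk, hok])]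
    refine List.filter_eq_nil_iff.mpr (fun s hsmem => ?_)
    have hslt := pvZip_tail_lt hsort s hsmem
    simp only [pvGood, Bool.and_eq_true, decide_eq_true_eq, not_and]
    intro h1 h2 h3; omega

lemma pvFlatMap_if_filter {α β : Type} (l : List α) (q : α → Bool) (f : α → List β) :
    (l.flatMap (fun a => if q a then f a else [])) = (l.filter q).flatMap f := by
  induction l with
  | nil => rfl
  | cons a l ih =>
    by_cases h : q a <;> simp [h, ih]

lemma pvMain : ∀ (p : List ((Int × Int) × (Int × Int))),
    (pvCart (p.map (fun sp => pvMarkers sp.1 sp.2))).filter (pvInside p) =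
      if p.all pvOk then [p.map pvLoHi] else [] := by
  intro p
  induction p with
  | nil => simp [pvCart, pvInside]
  | cons sp rest ih =>
    have hfm : ∀ (l : List (Int × Int)) (f : (Int × Int) → List (List (Int × Int)))
        (q : List (Int × Int) → Bool),
        (l.flatMap f).filter q = l.flatMap (fun s => (f s).filter q) := by
      intro l f q
      induction l with
      | nil => rfl
      | cons a l ih2 => simp [List.filter_append, ih2]
    have hfmap : ∀ (l : List (List (Int × Int))) (s : Int × Int)
        (q : List (Int × Int) → Bool),
        (l.map (s :: ·)).filter q = (l.filter (fun c => q (s :: c))).map (s :: ·) := by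
      intro l s q
      induction l with
      | nil => rfl
      | cons c l ih2 =>
        by_cases h : q (s :: c) <;> simp [h, ih2]
    simp only [List.map_cons, pvCart]
    rw [hfm]
    have hstep : ∀ s : Int × Int,
        ((pvCart (rest.map (fun sp => pvMarkers sp.1 sp.2))).map (s :: ·)).filter
            (pvInside (sp :: rest)) =
          if pvGood sp s then
            ((pvCart (rest.map (fun sp => pvMarkers sp.1 sp.2))).filter
              (pvInside rest)).map (s :: ·)
          else [] := by
      intro s
      rw [hfmap]
      have : ∀ c, pvInside (sp :: rest) (s :: c) = (pvGood sp s && pvInside rest c) := by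
        intro c; simp [pvInside]
      rw [List.filter_congr (fun c _ => this c)]
      by_cases h : pvGood sp s
      · rw [if_pos h]; simp only [h, Bool.true_and]
      · simp [h]
    rw [List.flatMap_congr (fun s _ => hstep s), pvFlatMap_if_filter, pvDim_filter, ih]
    by_cases h1 : pvOk sp
    · by_cases h2 : rest.all pvOk <;> simp [h1, h2]
    · simp [h1]

-- ===== VERDICT (by name: the statement is the Claim_ definition above) =====
theorem intersection_block_spec : Claim_equal_intersection_block := by
  intro a b _ hpre
  show intersection_block a b = intersection_block_alt a b
  have hz : a.zip b ≠ [] := by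
    rcases a with _ | ⟨x, a'⟩
    · exact absurd rfl hpre.1
    rcases b with _ | ⟨y, b'⟩
    · exact absurd rfl hpre.2
    simp
  unfold intersection_block pvCombineBlocks intersection_block_alt
  rw [pvIterDim_eq_cart _ (by simpa using hz)]
  simp only [List.nil_append, List.map_id_fun', id_eq]
  rw [List.filter_congr (fun c hc => ?_), pvMain (a.zip b), pvGo_eq]
  · simp
  · have hlen : c.length = (a.zip b).length := by
      have := pvMem_cart_length _ c hc
      simpa using this
    rw [pvZip_split _ _ a b c hlen]
    rfl

theorem intersection_block_raises : Claim_raises_intersection_block := by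
  unfold Claim_raises_intersection_block
  exact ⟨by intro a b _ hr hp; rcases hr with h | h <;> simp [Pre_intersection_block, h] at hp, by decide⟩

-- self-check: at the raise witness B's port indeed returns the stated literal
theorem intersection_block_raises_ok :
    intersection_block_alt pvRaiseWitness_intersection_block.1 pvRaiseWitness_intersection_block.2 =
      pvRaiseWitnessOut_intersection_block :=
  intersection_block_raises.2.2.2
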